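-- pv_equiv track=rewrite | github.com/uniphix000/segmentor | src/utils.py | get_intervals
-- ===== SOURCE A (Python) =====
-- def get_intervals(tag):
--   intervals = []
--   l = len(tag)
--   i = 0
--   while (i < l):
--     if (tag[i] == 2 or tag[i] == 3):
--       intervals.append((i, i))
--       i += 1
--       continue
--     j = i + 1
--     while (True):
--       if (j == l or tag[j] == 0 or tag[j] == 3):
--         intervals.append((i, j - 1))
--         i = j
--         break
--       elif (tag[j] == 2):
--         intervals.append((i, j))
--         i = j + 1
--         break
--       else:
--         j += 1
--   return intervals
-- ===== SOURCE B (Python) =====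
-- def get_intervals(tag):
--     intervals = []
--     start = None  # index where the currently open segment began, or None
--     for k, t in enumerate(tag):
--         if t == 2:
--             if start is None:
--                 intervals.append((k, k))
--             else:
--                 intervals.append((start, k))
--             start = None
--         elif t == 3:
--             if start is not None:
--                 intervals.append((start, k - 1))
--             intervals.append((k, k))
--             start = None
--         elif t == 0:
--             if start is not None:
--                 intervals.append((start, k - 1))
--             start = k
--         else:
--             if start is None:
--                 start = k
--     if start is not None:
--         intervals.append((start, len(tag) - 1))
--     return intervals
-- ===== Notes on version B (the rewrite author's own statement) =====
-- stated objective: simpler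
-- what changed: Replaced A's nested while-loops (outer index loop plus inner forward scan that searches for the segment end) by a single flat pass over enumerate(tag) maintaining one piece of state, the index of the currently open segment (or None), emitting intervals as tags 0/2/3 are met and closing any open segment after the loop.
import Mathlib
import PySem

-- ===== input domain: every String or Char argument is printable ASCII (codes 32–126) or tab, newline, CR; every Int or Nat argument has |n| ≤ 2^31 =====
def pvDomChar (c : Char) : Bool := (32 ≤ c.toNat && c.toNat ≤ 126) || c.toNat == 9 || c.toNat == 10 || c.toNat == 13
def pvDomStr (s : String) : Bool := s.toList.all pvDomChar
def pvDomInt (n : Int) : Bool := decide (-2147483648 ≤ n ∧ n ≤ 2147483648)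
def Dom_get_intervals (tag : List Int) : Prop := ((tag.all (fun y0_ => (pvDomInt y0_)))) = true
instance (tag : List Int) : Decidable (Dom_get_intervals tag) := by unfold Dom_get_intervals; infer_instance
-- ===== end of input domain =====

-- B replaces A's nested while-loops by one flat pass over enumerate(tag) tracking the open-segment start; objective: simpler.

-- ===== PORT A =====
-- A's inner `while True` scan: returns (the appended interval, the next value of i); fueled (any fuel > l - j reaches the Python behaviour; the port calls it with l + 1)
def pvInnerA (tag : List Int) (l i : Nat) : Nat → Nat → (Int × Int) × Nat
  | 0, _ => (((i : Int), (i : Int)), l)  -- fuel exhaustion, never reached from the port's call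
  | fuel + 1, j =>
    if j = l ∨ tag.getD j 0 = 0 ∨ tag.getD j 0 = 3 then (((i : Int), (j : Int) - 1), j)
    else if tag.getD j 0 = 2 then (((i : Int), (j : Int)), j + 1)
    else pvInnerA tag l i fuel (j + 1)

-- A's outer `while i < l` loop; fueled (any fuel > l - i reaches the Python behaviour)
def pvOuterA (tag : List Int) (l : Nat) : Nat → Nat → List (Int × Int)
  | 0, _ => []
  | fuel + 1, i =>
    if i < l then
      if tag.getD i 0 = 2 ∨ tag.getD i 0 = 3 then
        ((i : Int), (i : Int)) :: pvOuterA tag l fuel (i + 1)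
      else
        let r := pvInnerA tag l i (l + 1) (i + 1)
        r.1 :: pvOuterA tag l fuel r.2
    else []

def get_intervals (tag : List Int) : List (Int × Int) :=
  pvOuterA tag tag.length (tag.length + 1) 0

-- ===== PORT B =====
-- one step of Source B's for-loop: state = (intervals so far, open-segment start or none)
def pvStepB (st : List (Int × Int) × Option Int) (kt : Int × Int) : List (Int × Int) × Option Int :=
  let (acc, start) := st
  let (k, t) := kt
  if t = 2 then
    (match start with
     | none => acc ++ [(k, k)]
     | some s => acc ++ [(s, k)], none)
  else if t = 3 then
    ((match start with
      | some s => acc ++ [(s, k - 1)]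
      | none => acc) ++ [(k, k)], none)
  else if t = 0 then
    ((match start with
      | some s => acc ++ [(s, k - 1)]
      | none => acc), some k)
  else
    (acc, some (start.getD k))

def get_intervals_alt (tag : List Int) : List (Int × Int) :=
  let r := (PySem.List.enumerate tag 0).foldl pvStepB ([], none)
  match r.2 with
  | some s => r.1 ++ [(s, (tag.length : Int) - 1)]
  | none => r.1

-- ===== PRECONDITION & SPEC =====
def Spec_get_intervals (tag : List Int) (out : List (Int × Int)) : Prop := out = get_intervals_alt tag
instance (tag : List Int) (out : List (Int × Int)) : Decidable (Spec_get_intervals tag out) := by unfold Spec_get_intervals; infer_instance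

-- ===== CLAIM (what is proved, stated in full; the proofs are below) =====
def Claim_equal_get_intervals : Prop := ∀ (tag : List Int), Dom_get_intervals tag → Spec_get_intervals tag (get_intervals tag)

-- ===== LEMMAS AND PROOFS =====

-- the common abstract semantics both ports are reduced to: one pass at position k with open segment start
def pvRun : Int → Option Int → List Int → List (Int × Int)
  | k, start, [] =>
    match start with
    | some s => [(s, k - 1)]
    | none => []
  | k, start, t :: rest =>
    if t = 2 then
      (match start with
       | none => (k, k)
       | some s => (s, k)) :: pvRun (k + 1) none rest
    else if t = 3 then
      (match start with
       | some s => [(s, k - 1)]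
       | none => []) ++ (k, k) :: pvRun (k + 1) none rest
    else if t = 0 then
      (match start with
       | some s => [(s, k - 1)]
       | none => []) ++ pvRun (k + 1) (some k) rest
    else
      pvRun (k + 1) (some (start.getD k)) rest

theorem pvFoldB_eq (tag : List Int) :
    ∀ (k : Int) (acc : List (Int × Int)) (start : Option Int),
      (match ((PySem.List.enumerate tag k).foldl pvStepB (acc, start)) with
       | (a, some s) => a ++ [(s, k + tag.length - 1)]
       | (a, none) => a) = acc ++ pvRun k start tag := by
  induction tag with
  | nil =>
    intro k acc start
    cases start <;> simp [PySem.List.enumerate, pvRun]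
  | cons t rest ih =>
    intro k acc start
    rw [PySem.List.enumerate_cons]
    simp only [List.foldl_cons]
    have hlen : k + ((t :: rest).length : Int) - 1 = (k + 1) + (rest.length : Int) - 1 := by
      simp; ring
    rw [hlen]
    by_cases h2 : t = 2
    · cases start <;>
        simp only [pvStepB, h2, if_true, pvRun] <;>
        rw [ih] <;> simp
    · by_cases h3 : t = 3
      · cases start <;>
          simp only [pvStepB, h3, if_true, pvRun, if_neg h2] <;>
          rw [ih] <;> simp
      · by_cases h0 : t = 0
        · cases start <;>
            simp only [pvStepB, h0, if_true, pvRun, if_neg h2, if_neg h3] <;>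
            rw [ih] <;> simp
        · cases start <;>
            simp only [pvStepB, h2, h3, h0, if_false, pvRun, Option.getD] <;>
            rw [ih]

theorem pvInnerA_eq (tag : List Int) (i : Nat) :
    ∀ fuel j, i < j → j ≤ tag.length → tag.length - j < fuel →
      pvRun (j : Int) (some (i : Int)) (tag.drop j) =
        (pvInnerA tag tag.length i fuel j).1 ::
          pvRun ((pvInnerA tag tag.length i fuel j).2 : Int) none (tag.drop (pvInnerA tag tag.length i fuel j).2) ∧
      i < (pvInnerA tag tag.length i fuel j).2 ∧ (pvInnerA tag tag.length i fuel j).2 ≤ tag.length := by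
  intro fuel
  induction fuel with
  | zero => intro j _ _ h; omega
  | succ fuel ih =>
    intro j hij hj hfuel
    by_cases hend : j = tag.length
    · subst hend
      simp only [pvInnerA, if_pos (Or.inl rfl)]
      refine ⟨?_, hij, le_refl _⟩
      simp [pvRun]
    · have hlt : j < tag.length := by omega
      have hdrop : tag.drop j = tag[j] :: tag.drop (j + 1) := List.drop_eq_getElem_cons hlt
      have hgetD : tag.getD j 0 = tag[j] := List.getD_eq_getElem tag 0 hlt
      by_cases h03 : tag[j] = 0 ∨ tag[j] = 3
      · have hcond : j = tag.length ∨ tag.getD j 0 = 0 ∨ tag.getD j 0 = 3 := by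
          rw [hgetD]; exact Or.inr h03
        simp only [pvInnerA, if_pos hcond]
        refine ⟨?_, hij, le_of_lt hlt⟩
        rcases h03 with h0 | h3
        · rw [hdrop, h0]; simp [pvRun]
        · rw [hdrop, h3]; simp [pvRun]
      · push_neg at h03
        have hcond : ¬ (j = tag.length ∨ tag.getD j 0 = 0 ∨ tag.getD j 0 = 3) := by
          rw [hgetD]; push_neg; exact ⟨hend, h03.1, h03.2⟩
        by_cases h2 : tag[j] = 2
        · have h2' : tag.getD j 0 = 2 := by rw [hgetD]; exact h2
          simp only [pvInnerA, if_neg hcond, if_pos h2']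
          refine ⟨?_, by omega, by omega⟩
          rw [hdrop, h2]; simp [pvRun]
        · have h2' : tag.getD j 0 ≠ 2 := by rw [hgetD]; exact h2
          simp only [pvInnerA, if_neg hcond, if_neg h2']
          have hrec := ih (j + 1) (by omega) (by omega) (by omega)
          refine ⟨?_, hrec.2.1, hrec.2.2⟩
          rw [hdrop]
          simp only [pvRun, if_neg h2, if_neg h03.2, if_neg h03.1, Option.getD_some]
          rw [show ((j : Int)) + 1 = ((j + 1 : Nat) : Int) by push_cast; ring]
          exact hrec.1

theorem pvOuterA_eq (tag : List Int) :
    ∀ fuel i, i ≤ tag.length → tag.length - i < fuel →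
      pvOuterA tag tag.length fuel i = pvRun (i : Int) none (tag.drop i) := by
  intro fuel
  induction fuel with
  | zero => intro i _ h; omega
  | succ fuel ih =>
    intro i hi hfuel
    by_cases hend : i = tag.length
    · subst hend
      simp [pvOuterA, pvRun]
    · have hlt : i < tag.length := by omega
      have hdrop : tag.drop i = tag[i] :: tag.drop (i + 1) := List.drop_eq_getElem_cons hlt
      have hgetD : tag.getD i 0 = tag[i] := List.getD_eq_getElem tag 0 hlt
      by_cases h23 : tag[i] = 2 ∨ tag[i] = 3
      · have hcond : tag.getD i 0 = 2 ∨ tag.getD i 0 = 3 := by rw [hgetD]; exact h23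
        simp only [pvOuterA, if_pos hlt, if_pos hcond]
        rw [ih (i + 1) (by omega) (by omega), hdrop]
        rcases h23 with h2 | h3
        · rw [h2]; simp [pvRun]
        · rw [h3]; simp [pvRun]
      · push_neg at h23
        have hcond : ¬ (tag.getD i 0 = 2 ∨ tag.getD i 0 = 3) := by
          rw [hgetD]; push_neg; exact h23
        simp only [pvOuterA, if_pos hlt, if_neg hcond]
        have hin := pvInnerA_eq tag i (tag.length + 1) (i + 1) (by omega) (by omega) (by omega)
        show (pvInnerA tag tag.length i (tag.length + 1) (i + 1)).1 ::
            pvOuterA tag tag.length fuel (pvInnerA tag tag.length i (tag.length + 1) (i + 1)).2 = _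
        rw [ih _ hin.2.2 (by omega), ← hin.1, hdrop]
        by_cases h0 : tag[i] = 0
        · rw [h0]; simp [pvRun]
        · simp only [pvRun, if_neg h23.1, if_neg h23.2, if_neg h0, Option.getD_none]
          norm_cast

-- ===== VERDICT (by name: the statement is the Claim_ definition above) =====
theorem get_intervals_spec : Claim_equal_get_intervals := by
  intro tag _
  unfold Spec_get_intervals get_intervals get_intervals_alt
  have hA := pvOuterA_eq tag (tag.length + 1) 0 (Nat.zero_le _) (by omega)
  have hB := pvFoldB_eq tag 0 [] none
  simp only [List.drop_zero, Nat.cast_zero, zero_add, List.nil_append] at hA hB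
  rw [hA, ← hB]
  rcases hfold : (PySem.List.enumerate tag 0).foldl pvStepB ([], none) with ⟨a, st⟩
  cases st <;> simp
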